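-- pv_equiv track=rewrite | github.com/Hanul-Company/unlisted-front-core | app/admin/tracks/playlist_uploader.py | replace_tracklist
-- ===== SOURCE A (Python) =====
-- from typing import List, Optional, Dict, Any
--
-- def replace_tracklist(description: str, track_assets: list, timestamps: List[str]) -> str:
--     lines  = description.splitlines()
--     result = []
--     i      = 0
--     while i < len(lines):
--         line = lines[i]
--         if line.strip() == "[Tracklist]":
--             result.append(line)
--             i += 1
--             while i < len(lines) and lines[i].strip() != "":
--                 i += 1
--             for idx, asset in enumerate(track_assets):
--                 ts     = timestamps[idx] if idx < len(timestamps) else "0:00"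
--                 title  = asset.get("title",  f"Track {idx+1}")
--                 artist = asset.get("artist", "Unknown")
--                 result.append(f"{ts} {artist} - {title}")
--         else:
--             result.append(line)
--             i += 1
--     return "\n".join(result)
-- ===== SOURCE B (Python) =====
-- def replace_tracklist(description: str, track_assets: list, timestamps: list) -> str:
--     new_entries = [
--         "{} {} - {}".format(
--             timestamps[i] if i < len(timestamps) else "0:00",
--             a.get("artist", "Unknown"),
--             a.get("title", f"Track {i+1}"),
--         )
--         for i, a in enumerate(track_assets)
--     ]
--
--     def rewrite(lines):
--         # locate the next marker; if none, the suffix is kept verbatim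
--         m = next((i for i, l in enumerate(lines) if l.strip() == "[Tracklist]"), None)
--         if m is None:
--             return lines
--         rest = lines[m + 1:]
--         # length of the old block: lines up to (not including) the first blank
--         k = next((i for i, l in enumerate(rest) if l.strip() == ""), len(rest))
--         return lines[:m + 1] + new_entries + rewrite(rest[k:])
--
--     return "\n".join(rewrite(description.splitlines()))
-- ===== Notes on version B (the rewrite author's own statement) =====
-- stated objective: alternative
-- what changed: Replaces A's single indexed while-loop (with a nested skip-ahead while) by a recursive search-slice-splice decomposition: find the first marker, keep the prefix slice, splice a pre-built entries block, and recurse on the suffix after the old block.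
import Mathlib
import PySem

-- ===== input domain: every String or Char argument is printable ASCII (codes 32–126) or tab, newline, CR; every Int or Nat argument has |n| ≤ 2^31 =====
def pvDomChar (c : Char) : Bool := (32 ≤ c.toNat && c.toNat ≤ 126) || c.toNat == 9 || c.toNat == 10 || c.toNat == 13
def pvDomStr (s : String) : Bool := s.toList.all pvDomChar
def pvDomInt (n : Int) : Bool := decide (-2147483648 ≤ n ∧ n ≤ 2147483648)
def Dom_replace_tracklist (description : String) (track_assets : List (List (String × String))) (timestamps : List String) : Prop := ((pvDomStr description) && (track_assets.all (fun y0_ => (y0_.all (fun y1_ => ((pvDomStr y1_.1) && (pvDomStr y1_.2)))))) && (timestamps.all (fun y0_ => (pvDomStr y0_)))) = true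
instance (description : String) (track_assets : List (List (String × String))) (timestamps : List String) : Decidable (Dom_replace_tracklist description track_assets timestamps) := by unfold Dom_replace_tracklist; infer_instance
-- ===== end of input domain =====

-- B replaces A's single indexed scan (with a nested skip-ahead while) by a recursive
-- search-slice-splice decomposition on list suffixes (objective: alternative, same cost).

-- ===== PORT A =====
-- inner `while i < len(lines) and lines[i].strip() != "": i += 1` of A
def pvSkipIdx (lines : List String) (i : Nat) : Nat :=
  if h : i < lines.length then
    if PySem.Str.strip lines[i] ≠ "" then pvSkipIdx lines (i + 1) else i
  else i
termination_by lines.length - i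

-- needed only for the termination of pvGoA below
theorem pv_le_skipIdx (lines : List String) (i : Nat) : i ≤ pvSkipIdx lines i := by
  unfold pvSkipIdx
  split
  · split
    · exact Nat.le_trans (Nat.le_succ i) (pv_le_skipIdx lines (i + 1))
    · exact Nat.le_refl i
  · exact Nat.le_refl i
termination_by lines.length - i

-- A's outer while-loop over the index i, accumulating `result`
def pvGoA (track_assets : List (List (String × String))) (timestamps : List String)
    (lines : List String) (i : Nat) (result : List String) : List String :=
  if h : i < lines.length then
    let line := lines[i]
    if PySem.Str.strip line = "[Tracklist]" then
      let j := pvSkipIdx lines (i + 1)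
      let result2 := (PySem.List.enumerate track_assets).foldl
        (fun r p =>
          r ++ [(if p.1 < (timestamps.length : Int) then PySem.List.pyGetD timestamps p.1 "0:00" else "0:00")
                ++ " " ++ PySem.Dict.getD (PySem.Dict.mk p.2) "artist" "Unknown" ++ " - "
                ++ PySem.Dict.getD (PySem.Dict.mk p.2) "title" ("Track " ++ PySem.Int.toStr (p.1 + 1))])
        (result ++ [line])
      pvGoA track_assets timestamps lines j result2
    else
      pvGoA track_assets timestamps lines (i + 1) (result ++ [line])
  else result
termination_by lines.length - i
decreasing_by
  · have := pv_le_skipIdx lines (i + 1); omega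
  · omega

def replace_tracklist (description : String) (track_assets : List (List (String × String))) (timestamps : List String) : String :=
  PySem.Str.join "\n" (pvGoA track_assets timestamps (PySem.Str.splitlines description) 0 [])

-- ===== PORT B =====
-- `next((i for i, l in enumerate(lines) if l.strip() == "[Tracklist]"), None)`
def pvFindMarker? : List String → Option Nat
  | [] => none
  | l :: ls => if PySem.Str.strip l = "[Tracklist]" then some 0 else (pvFindMarker? ls).map (· + 1)

-- `next((i for i, l in enumerate(rest) if l.strip() == ""), len(rest))`
def pvFindBlankLen : List String → Nat
  | [] => 0
  | l :: ls => if PySem.Str.strip l = "" then 0 else pvFindBlankLen ls + 1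

-- needed only for the termination of pvRewrite below
theorem pv_marker_pos {lines : List String} {m : Nat} (h : pvFindMarker? lines = some m) :
    0 < lines.length := by
  cases lines with
  | nil => simp [pvFindMarker?] at h
  | cons l ls => simp

-- B's recursive `rewrite`: find the marker, keep the prefix, splice the new block,
-- recurse on the suffix after the old block
def pvRewrite (NE : List String) (lines : List String) : List String :=
  match h : pvFindMarker? lines with
  | none => lines
  | some m =>
    let rest := lines.drop (m + 1)
    let k := pvFindBlankLen rest
    lines.take (m + 1) ++ NE ++ pvRewrite NE (rest.drop k)
termination_by lines.length
decreasing_by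
  have := pv_marker_pos h
  simp only [List.length_drop]
  omega

def replace_tracklist_alt (description : String) (track_assets : List (List (String × String))) (timestamps : List String) : String :=
  let newEntries := (PySem.List.enumerate track_assets).map
    (fun p =>
      (if p.1 < (timestamps.length : Int) then PySem.List.pyGetD timestamps p.1 "0:00" else "0:00")
      ++ " " ++ PySem.Dict.getD (PySem.Dict.mk p.2) "artist" "Unknown" ++ " - "
      ++ PySem.Dict.getD (PySem.Dict.mk p.2) "title" ("Track " ++ PySem.Int.toStr (p.1 + 1)))
  PySem.Str.join "\n" (pvRewrite newEntries (PySem.Str.splitlines description))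

-- ===== PRECONDITION & SPEC =====
def Spec_replace_tracklist (description : String) (track_assets : List (List (String × String))) (timestamps : List String) (out : String) : Prop := out = replace_tracklist_alt description track_assets timestamps
instance (description : String) (track_assets : List (List (String × String))) (timestamps : List String) (out : String) : Decidable (Spec_replace_tracklist description track_assets timestamps out) := by unfold Spec_replace_tracklist; infer_instance

-- ===== CLAIM (what is proved, stated in full; the proofs are below) =====
def Claim_equal_replace_tracklist : Prop := ∀ (description : String) (track_assets : List (List (String × String))) (timestamps : List String), Dom_replace_tracklist description track_assets timestamps → Spec_replace_tracklist description track_assets timestamps (replace_tracklist description track_assets timestamps)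

-- ===== LEMMAS AND PROOFS =====

theorem pv_foldl_append_map {α β : Type} (f : α → β) :
    ∀ (l : List α) (acc : List β),
      l.foldl (fun r p => r ++ [f p]) acc = acc ++ l.map f := by
  intro l
  induction l with
  | nil => intro acc; simp
  | cons x xs ih => intro acc; simp [List.foldl, ih]

theorem pvRewrite_none {NE lines : List String} (h : pvFindMarker? lines = none) :
    pvRewrite NE lines = lines := by
  rw [pvRewrite]; split <;> simp_all

theorem pvRewrite_some {NE lines : List String} {m : Nat} (h : pvFindMarker? lines = some m) :
    pvRewrite NE lines =
      lines.take (m + 1) ++ NE ++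
        pvRewrite NE ((lines.drop (m + 1)).drop (pvFindBlankLen (lines.drop (m + 1)))) := by
  rw [pvRewrite]; split <;> simp_all

theorem pvRewrite_cons_marker (NE : List String) (l : String) (ls : List String)
    (h : PySem.Str.strip l = "[Tracklist]") :
    pvRewrite NE (l :: ls) = l :: (NE ++ pvRewrite NE (ls.drop (pvFindBlankLen ls))) := by
  have hm : pvFindMarker? (l :: ls) = some 0 := by simp [pvFindMarker?, h]
  rw [pvRewrite_some hm]; simp

theorem pvRewrite_cons_plain (NE : List String) (l : String) (ls : List String)
    (h : ¬ PySem.Str.strip l = "[Tracklist]") :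
    pvRewrite NE (l :: ls) = l :: pvRewrite NE ls := by
  cases hm : pvFindMarker? ls with
  | none =>
    have : pvFindMarker? (l :: ls) = none := by simp [pvFindMarker?, h, hm]
    rw [pvRewrite_none this, pvRewrite_none hm]
  | some m =>
    have hcons : pvFindMarker? (l :: ls) = some (m + 1) := by simp [pvFindMarker?, h, hm]
    rw [pvRewrite_some hcons, pvRewrite_some hm]
    simp [List.take_succ_cons, List.drop_succ_cons]

-- A's inner skip loop measured against B's blank search
theorem pv_skipIdx_eq (lines : List String) :
    ∀ (n j : Nat), lines.length - j ≤ n →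
      pvSkipIdx lines j = j + pvFindBlankLen (lines.drop j) := by
  intro n
  induction n with
  | zero =>
    intro j hj
    have hge : ¬ j < lines.length := by omega
    have : lines.drop j = [] := List.drop_eq_nil_of_le (by omega)
    rw [pvSkipIdx]; simp [hge, this, pvFindBlankLen]
  | succ m ih =>
    intro j hj
    by_cases h : j < lines.length
    · have hdrop : lines.drop j = lines[j] :: lines.drop (j + 1) := List.drop_eq_getElem_cons h
      by_cases hb : PySem.Str.strip lines[j] = ""
      · rw [pvSkipIdx, dif_pos h, if_neg (by simp [hb]), hdrop]
        have hstep : pvFindBlankLen (lines[j] :: lines.drop (j + 1)) = 0 := by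
          simp only [pvFindBlankLen]; rw [if_pos hb]
        rw [hstep]; omega
      · rw [pvSkipIdx]
        simp only [h, dif_pos, ne_eq, hb, not_false_iff, if_pos]
        rw [ih (j + 1) (by omega), hdrop]
        have hstep : pvFindBlankLen (lines[j] :: lines.drop (j + 1)) =
            pvFindBlankLen (lines.drop (j + 1)) + 1 := by
          simp only [pvFindBlankLen]; rw [if_neg hb]
        rw [hstep]; omega
    · have : lines.drop j = [] := List.drop_eq_nil_of_le (by omega)
      rw [pvSkipIdx]; simp [h, this, pvFindBlankLen]

-- the simulation: A's indexed loop from i equals B's rewrite of the suffix from i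
theorem pv_sim (tas : List (List (String × String))) (ts : List String)
    (NE : List String)
    (hNE : NE = (PySem.List.enumerate tas).map
      (fun p =>
        (if p.1 < (ts.length : Int) then PySem.List.pyGetD ts p.1 "0:00" else "0:00")
        ++ " " ++ PySem.Dict.getD (PySem.Dict.mk p.2) "artist" "Unknown" ++ " - "
        ++ PySem.Dict.getD (PySem.Dict.mk p.2) "title" ("Track " ++ PySem.Int.toStr (p.1 + 1))))
    (lines : List String) :
    ∀ (n i : Nat), lines.length - i ≤ n →
      ∀ result, pvGoA tas ts lines i result = result ++ pvRewrite NE (lines.drop i) := by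
  intro n
  induction n with
  | zero =>
    intro i hi result
    have hge : ¬ i < lines.length := by omega
    have hdrop : lines.drop i = [] := List.drop_eq_nil_of_le (by omega)
    rw [pvGoA, hdrop, pvRewrite_none (by simp [pvFindMarker?])]
    simp [hge]
  | succ m ih =>
    intro i hi result
    by_cases h : i < lines.length
    · have hdrop : lines.drop i = lines[i] :: lines.drop (i + 1) := List.drop_eq_getElem_cons h
      by_cases hmark : PySem.Str.strip lines[i] = "[Tracklist]"
      · rw [pvGoA]
        simp only [h, dif_pos, hmark, if_pos]
        rw [pv_foldl_append_map, ← hNE]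
        have hj := pv_skipIdx_eq lines (lines.length - (i + 1)) (i + 1) (by omega)
        have hjge : i + 1 ≤ pvSkipIdx lines (i + 1) := pv_le_skipIdx lines (i + 1)
        rw [ih (pvSkipIdx lines (i + 1)) (by omega)]
        rw [hdrop, pvRewrite_cons_marker NE _ _ hmark]
        have : lines.drop (pvSkipIdx lines (i + 1)) =
            (lines.drop (i + 1)).drop (pvFindBlankLen (lines.drop (i + 1))) := by
          rw [hj, List.drop_drop]; try ring_nf
        rw [this]; simp
      · rw [pvGoA]
        simp only [h, dif_pos, hmark, if_neg, not_false_iff]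
        rw [ih (i + 1) (by omega)]
        rw [hdrop, pvRewrite_cons_plain NE _ _ hmark]
        try simp
    · have hdrop : lines.drop i = [] := List.drop_eq_nil_of_le (by omega)
      rw [pvGoA, hdrop, pvRewrite_none (by simp [pvFindMarker?])]
      simp [h]

-- ===== VERDICT (by name: the statement is the Claim_ definition above) =====
theorem replace_tracklist_spec : Claim_equal_replace_tracklist := by
  unfold Claim_equal_replace_tracklist
  intro description tas ts _
  unfold Spec_replace_tracklist replace_tracklist replace_tracklist_alt
  have h := pv_sim tas ts _ rfl (PySem.Str.splitlines description)
    (PySem.Str.splitlines description).length 0 (by omega) []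
  simp only at h ⊢
  rw [List.nil_append, List.drop_zero] at h
  rw [h]
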